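-- pv_equiv track=rewrite | github.com/aevri/mel | py/mel/cmd/rotomapoverview.py | make_overview
-- ===== SOURCE A (Python) =====
-- def make_overview(path, files):
--     angles = {f: None for f in files if f.lower().endswith('.jpg')}
--
--     for f in files:
--         if f.lower().endswith('.json'):
--             jpg_name = f[:-5]
--             if jpg_name in angles:
--                 angles[jpg_name] = f
--
--     results = []
--     for a in sorted(angles):
--         data_path = angles[a]
--         if data_path is None:
--             results.append('-')
--         else:
--             results.append('+')
--
--     return(''.join(results))
-- ===== SOURCE B (Python) =====
-- def make_overview(path, files):
--     jpgs = sorted({f for f in files if f.lower().endswith('.jpg')})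
--     stems = sorted({f[:-5] for f in files if f.lower().endswith('.json')})
--     out = []
--     i = 0
--     for a in jpgs:
--         while i < len(stems) and stems[i] < a:
--             i += 1
--         out.append('+' if i < len(stems) and stems[i] == a else '-')
--     return ''.join(out)
-- ===== Notes on version B (the rewrite author's own statement) =====
-- stated objective: alternative
-- what changed: Replaces A's None-valued dict, its marking pass over json files and its per-key lookup loop by sorting the two deduplicated name lists (jpg names and json basenames) once and emitting '+'/'-' with a single two-pointer merge scan over them instead of any dict/hash lookup.
import Mathlib
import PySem

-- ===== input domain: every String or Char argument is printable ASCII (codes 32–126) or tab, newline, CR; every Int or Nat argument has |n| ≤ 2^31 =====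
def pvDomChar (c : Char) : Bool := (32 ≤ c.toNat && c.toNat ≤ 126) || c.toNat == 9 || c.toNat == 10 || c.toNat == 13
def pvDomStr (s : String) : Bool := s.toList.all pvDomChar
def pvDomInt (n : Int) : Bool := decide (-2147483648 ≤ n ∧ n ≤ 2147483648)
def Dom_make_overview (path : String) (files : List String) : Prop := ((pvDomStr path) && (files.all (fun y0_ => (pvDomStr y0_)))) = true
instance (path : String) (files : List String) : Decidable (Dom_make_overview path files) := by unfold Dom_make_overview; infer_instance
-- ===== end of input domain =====

-- B replaces A's None-valued dict with its marking pass and lookup loop by a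
-- two-pointer merge of the two sorted deduplicated name lists (objective: alternative).

-- ===== PORT A =====
def make_overview (path : String) (files : List String) : String :=
  let angles : PySem.Dict String (Option String) :=
    files.foldl (fun d f =>
      if PySem.Str.endswith (PySem.Str.lower f) ".jpg" then d.insert f none else d)
      PySem.Dict.empty
  let angles := files.foldl (fun d f =>
      if PySem.Str.endswith (PySem.Str.lower f) ".json" then
        (if d.contains (PySem.Str.slice f none (some (-5)))
         then d.insert (PySem.Str.slice f none (some (-5))) (some f) else d)
      else d) angles
  -- 'a' ranges over angles' own keys, so angles[a] never raises; getD with default none is exact here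
  let results := (PySem.List.sorted (PySem.Dict.keys angles) (fun x => x) false).foldl
      (fun acc a => match angles.getD a none with
        | none => acc ++ ["-"]
        | some _ => acc ++ ["+"]) ([] : List String)
  PySem.Str.join "" results

-- ===== PORT B =====
-- B's loop over jpgs with the index i advancing through stems, as structural
-- recursion on the jpg list with the remaining (not yet passed) suffix of stems.
def moMerge : List String → List String → List String
  | [], _ => []
  | _ :: as, [] => "-" :: moMerge as []
  | a :: as, s :: ss =>
      if s < a then moMerge (a :: as) ss
      else if s == a then "+" :: moMerge as (s :: ss)
      else "-" :: moMerge as (s :: ss)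
termination_by xs ys => (xs.length, ys.length)

def make_overview_alt (path : String) (files : List String) : String :=
  let jpgs := PySem.List.sorted
    (PySem.Set.ofList (files.filter (fun f => PySem.Str.endswith (PySem.Str.lower f) ".jpg")))
    (fun x => x) false
  let stems := PySem.List.sorted
    (PySem.Set.ofList ((files.filter (fun f => PySem.Str.endswith (PySem.Str.lower f) ".json")).map
      (fun f => PySem.Str.slice f none (some (-5))))) (fun x => x) false
  PySem.Str.join "" (moMerge jpgs stems)

-- ===== PRECONDITION & SPEC =====
def Spec_make_overview (path : String) (files : List String) (out : String) : Prop := out = make_overview_alt path files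
instance (path : String) (files : List String) (out : String) : Decidable (Spec_make_overview path files out) := by unfold Spec_make_overview; infer_instance

-- ===== CLAIM (what is proved, stated in full; the proofs are below) =====
def Claim_equal_make_overview : Prop := ∀ (path : String) (files : List String), Dom_make_overview path files → Spec_make_overview path files (make_overview path files)

-- ===== LEMMAS AND PROOFS =====

-- A's second loop only overwrites existing keys, so it preserves the key list.
theorem mo_keys_step2 (l : List String) (d : PySem.Dict String (Option String)) :
    PySem.Dict.keys (l.foldl (fun d f =>
      if PySem.Str.endswith (PySem.Str.lower f) ".json" then
        (if d.contains (PySem.Str.slice f none (some (-5)))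
         then d.insert (PySem.Str.slice f none (some (-5))) (some f) else d)
      else d) d) = PySem.Dict.keys d := by
  induction l generalizing d with
  | nil => rfl
  | cons f t ih =>
      simp only [List.foldl_cons]
      by_cases h1 : PySem.Str.endswith (PySem.Str.lower f) ".json" = true
      · rw [if_pos h1]
        by_cases h2 : d.contains (PySem.Str.slice f none (some (-5))) = true
        · rw [if_pos h2, ih, PySem.Dict.keys_insert_of_contains _ _ h2]
        · rw [if_neg h2, ih]
      · rw [if_neg h1, ih]

-- A's first loop stores only none, so every lookup with default none is none.
theorem mo_getD_step1 (l : List String) (d : PySem.Dict String (Option String)) (a : String)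
    (h : d.getD a none = none) :
    (l.foldl (fun d f =>
      if PySem.Str.endswith (PySem.Str.lower f) ".jpg" then d.insert f none else d) d).getD a none
      = none := by
  induction l generalizing d with
  | nil => exact h
  | cons f t ih =>
      simp only [List.foldl_cons]
      apply ih
      by_cases h1 : PySem.Str.endswith (PySem.Str.lower f) ".jpg" = true
      · rw [if_pos h1, PySem.Dict.getD_insert]
        split_ifs with h2
        · rfl
        · exact h
      · rw [if_neg h1]; exact h

-- After A's marking loop, a key's value is non-None iff some json file in the list has that stem.
theorem mo_isSome_step2 (l : List String) (d : PySem.Dict String (Option String)) (a : String)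
    (hc : d.contains a = true) :
    ((l.foldl (fun d f =>
      if PySem.Str.endswith (PySem.Str.lower f) ".json" then
        (if d.contains (PySem.Str.slice f none (some (-5)))
         then d.insert (PySem.Str.slice f none (some (-5))) (some f) else d)
      else d) d).getD a none).isSome
    = ((d.getD a none).isSome
       || l.any (fun f => PySem.Str.endswith (PySem.Str.lower f) ".json"
            && (PySem.Str.slice f none (some (-5)) == a))) := by
  induction l generalizing d with
  | nil => simp
  | cons f t ih =>
      simp only [List.foldl_cons, List.any_cons]
      by_cases h1 : PySem.Str.endswith (PySem.Str.lower f) ".json" = true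
      · rw [if_pos h1]
        by_cases h2 : d.contains (PySem.Str.slice f none (some (-5))) = true
        · rw [if_pos h2,
              ih _ (by rw [PySem.Dict.contains_insert, hc, Bool.or_true]),
              PySem.Dict.getD_insert]
          by_cases h3 : a = PySem.Str.slice f none (some (-5))
          · have hbeq : (PySem.Str.slice f none (some (-5)) == a) = true :=
              beq_iff_eq.mpr h3.symm
            rw [if_pos h3]
            simp only [Option.isSome_some, Bool.true_or, h1, hbeq, Bool.true_and, Bool.or_true]
          · rw [if_neg h3]
            have hne : (PySem.Str.slice f none (some (-5)) == a) = false :=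
              beq_eq_false_iff_ne.mpr (Ne.symm h3)
            simp only [h1, hne, Bool.true_and, Bool.false_or]
        · rw [if_neg h2, ih _ hc]
          have hne : (PySem.Str.slice f none (some (-5)) == a) = false := by
            rw [beq_eq_false_iff_ne]
            intro h; rw [h] at h2; exact h2 hc
          simp only [h1, hne, Bool.true_and, Bool.false_or]
      · rw [if_neg h1, ih _ hc]
        have h1' : PySem.Str.endswith (PySem.Str.lower f) ".json" = false :=
          Bool.eq_false_iff.mpr h1
        simp only [h1', Bool.false_and, Bool.false_or]

-- Correctness of B's two-pointer merge: on strictly increasing lists it marks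
-- each jpg name by membership in the stem list.
theorem moMerge_eq (jpgs stems : List String)
    (hj : jpgs.Pairwise (· < ·)) (hs : stems.Pairwise (· < ·)) :
    moMerge jpgs stems = jpgs.map (fun a => if a ∈ stems then "+" else "-") := by
  induction jpgs, stems using moMerge.induct with
  | case1 stems => simp [moMerge]
  | case2 a as ih =>
      rw [moMerge, ih (List.Pairwise.of_cons hj) hs]
      simp
  | case3 a as s ss hlt ih =>
      rw [moMerge, if_pos hlt, ih hj (List.Pairwise.of_cons hs)]
      apply List.map_congr_left
      intro x hx
      have hax : a ≤ x := by
        rcases hx with _ | hx'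
        · exact le_refl _
        · exact le_of_lt ((List.pairwise_cons.mp hj).1 x (by assumption))
      have hsx : ¬ x = s := fun h => absurd h.symm (ne_of_lt (lt_of_lt_of_le hlt hax))
      simp [List.mem_cons, hsx]
  | case4 a as s ss hlt heq ih =>
      rw [moMerge, if_neg hlt, if_pos heq, ih (List.Pairwise.of_cons hj) hs]
      have : a = s := (beq_iff_eq.mp heq).symm
      simp [List.map_cons, this]
  | case5 a as s ss hlt heq ih =>
      rw [moMerge, if_neg hlt, if_neg heq, ih (List.Pairwise.of_cons hj) hs]
      have has : a < s := lt_of_le_of_ne (le_of_not_gt (by simpa using hlt))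
        (fun h => heq (beq_iff_eq.mpr h.symm))
      have hnm : a ∉ s :: ss := by
        intro hm
        rcases List.mem_cons.mp hm with rfl | hm'
        · exact absurd has (lt_irrefl _)
        · exact absurd (lt_trans has ((List.pairwise_cons.mp hs).1 a hm')) (lt_irrefl _)
      simp only [List.mem_cons, not_or] at hnm
      simp [List.map_cons, List.mem_cons, hnm.1, hnm.2]

theorem make_overview_spec : Claim_equal_make_overview := by
  intro path files _
  unfold Spec_make_overview make_overview make_overview_alt
  dsimp only
  set p : String → Bool := fun f => PySem.Str.endswith (PySem.Str.lower f) ".jpg" with hp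
  set q : String → Bool := fun f => PySem.Str.endswith (PySem.Str.lower f) ".json" with hq
  set stem : String → String := fun f => PySem.Str.slice f none (some (-5)) with hstem
  set d1 : PySem.Dict String (Option String) :=
    files.foldl (fun d f => if p f then d.insert f none else d) PySem.Dict.empty with hd1
  set d2 : PySem.Dict String (Option String) :=
    files.foldl (fun d f =>
      if q f then (if d.contains (stem f) then d.insert (stem f) (some f) else d) else d) d1 with hd2
  set stemsSet : PySem.Set String := PySem.Set.ofList ((files.filter q).map stem) with hss
  -- keys of d1 = set of jpg names (first occurrences, in order)
  have hkeys1 : PySem.Dict.keys d1 = PySem.Set.ofList (files.filter p) := by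
    rw [hd1, PySem.List.foldl_if_eq_foldl_filter,
        PySem.Dict.keys_foldl_insert (f := fun _ _ => (none : Option String))]
    rfl
  have hkeys2 : PySem.Dict.keys d2 = PySem.Set.ofList (files.filter p) := by
    rw [hd2, hp, hq, hstem, hd1] at *
    rw [mo_keys_step2]
    exact hkeys1
  -- per-key value of d2
  have hval : ∀ a ∈ PySem.Dict.keys d2,
      (d2.getD a none).isSome = files.any (fun f => q f && (stem f == a)) := by
    intro a ha
    have hc : d1.contains a = true := by
      rw [PySem.Dict.contains_iff_mem_keys, hkeys1, ← hkeys2]; exact ha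
    rw [hd2, hp, hq, hstem, hd1] at *
    rw [mo_isSome_step2 _ _ _ hc, mo_getD_step1 _ _ _ (PySem.Dict.getD_empty _ _)]
    simp only [Option.isSome_none, Bool.false_or]
  -- membership in the sorted stem list
  have hmem : ∀ a : String,
      (a ∈ PySem.List.sorted stemsSet (fun x => x) false)
        ↔ files.any (fun f => q f && (stem f == a)) = true := by
    intro a
    rw [PySem.List.mem_sorted, hss]
    simp only [PySem.Set.mem_ofList, List.mem_map, List.mem_filter, List.any_eq_true,
      Bool.and_eq_true, beq_iff_eq]
    constructor
    · rintro ⟨f, ⟨hf, hqf⟩, rfl⟩; exact ⟨f, hf, hqf, rfl⟩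
    · rintro ⟨f, hf, hqf, rfl⟩; exact ⟨f, ⟨hf, hqf⟩, rfl⟩
  -- A's output loop is a map over the sorted keys
  have hfun : (fun (acc : List String) (a : String) => match d2.getD a none with
        | none => acc ++ ["-"]
        | some _ => acc ++ ["+"])
      = fun acc a => acc ++ [if (d2.getD a none).isSome then "+" else "-"] := by
    funext acc a
    rcases hx : d2.getD a none with _ | v <;> rfl
  rw [hfun, PySem.List.foldl_append_singleton_eq_map, List.nil_append,
      moMerge_eq _ _ (PySem.List.sorted_ofList_pairwise_lt _)
        (PySem.List.sorted_ofList_pairwise_lt _)]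
  rw [hkeys2]
  congr 1
  apply List.map_congr_left
  intro a ha
  have ha' : a ∈ PySem.Dict.keys d2 := by
    rw [hkeys2]; exact (PySem.List.mem_sorted _ _ _ _).mp ha
  have := hval a ha'
  by_cases hm : a ∈ PySem.List.sorted stemsSet (fun x => x) false
  · rw [if_pos hm, this, (hmem a).mp hm, if_pos rfl]
  · rw [if_neg hm, this]
    have : files.any (fun f => q f && (stem f == a)) = false := by
      rcases Bool.eq_false_or_eq_true (files.any (fun f => q f && (stem f == a))) with h | h
      · exact absurd ((hmem a).mpr h) hm
      · exact h
    rw [this]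
    simp
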